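-- pv_equiv track=rewrite | github.com/messense/jieba-rs | scripts/train_hmm.py | _words_to_spans
-- ===== SOURCE A (Python) =====
-- def _words_to_spans(words):
--     """Convert a list of words to a set of (start, end) character offset spans."""
--     spans = set()
--     offset = 0
--     for w in words:
--         w = w.strip()
--         if not w:
--             continue
--         spans.add((offset, offset + len(w)))
--         offset += len(w)
--     return spans
-- ===== SOURCE B (Python) =====
-- def _words_to_spans(words):
--     """Convert a list of words to a set of (start, end) character offset spans."""
--     stripped = [s for s in (w.strip() for w in words) if s]
--     offsets = [0]
--     for s in stripped:
--         offsets.append(offsets[-1] + len(s))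
--     return set(zip(offsets, offsets[1:]))
-- ===== Notes on version B (the rewrite author's own statement) =====
-- stated objective: alternative
-- what changed: Replaces A's fused running-offset loop that conditionally inserts into the set with a pipeline: filter out empty stripped words, build the prefix-sum table of character boundaries, then form the spans as zip of consecutive boundaries.
import Mathlib
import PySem

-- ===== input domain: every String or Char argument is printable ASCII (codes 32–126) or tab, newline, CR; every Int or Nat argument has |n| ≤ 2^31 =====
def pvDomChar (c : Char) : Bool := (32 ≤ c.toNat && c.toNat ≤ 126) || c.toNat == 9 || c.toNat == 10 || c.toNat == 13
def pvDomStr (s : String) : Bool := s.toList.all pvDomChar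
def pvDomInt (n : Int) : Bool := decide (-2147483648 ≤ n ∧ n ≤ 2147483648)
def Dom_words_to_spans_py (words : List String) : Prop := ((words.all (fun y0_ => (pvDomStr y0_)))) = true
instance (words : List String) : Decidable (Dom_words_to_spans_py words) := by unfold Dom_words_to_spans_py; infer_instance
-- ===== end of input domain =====

-- B replaces A's fused running-offset loop with a filter pass, a prefix-sum
-- table of boundaries, and a zip of consecutive boundaries (objective: alternative).

-- ===== PORT A =====
-- fused loop: state = (spans set, running offset)
def words_to_spans_py (words : List String) : List (Int × Int) :=
  (words.foldl
    (fun (st : List (Int × Int) × Int) w =>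
      let w' := PySem.Str.strip w
      if w' = "" then st
      else (PySem.Set.add st.1 (st.2, st.2 + PySem.Str.len w'),
            st.2 + PySem.Str.len w'))
    (PySem.Set.empty, 0)).1

-- ===== PORT B =====
def words_to_spans_py_alt (words : List String) : List (Int × Int) :=
  let stripped := ((words.map PySem.Str.strip).filter (fun s => s ≠ ""))
  -- offsets[-1] is the last element; the list starts as [0] so it is never empty
  let offsets := stripped.foldl
    (fun acc s => acc ++ [acc.getLastD 0 + PySem.Str.len s]) [(0 : Int)]
  -- offsets[1:] = offsets.tail (nonnegative slice); set(zip(...))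
  PySem.Set.ofList (offsets.zip offsets.tail)

-- ===== PRECONDITION & SPEC =====
def Spec_words_to_spans_py (words : List String) (out : List (Int × Int)) : Prop := out = words_to_spans_py_alt words
instance (words : List String) (out : List (Int × Int)) : Decidable (Spec_words_to_spans_py words out) := by unfold Spec_words_to_spans_py; infer_instance

-- ===== CLAIM (what is proved, stated in full; the proofs are below) =====
def Claim_equal_words_to_spans_py : Prop := ∀ (words : List String), Dom_words_to_spans_py words → Spec_words_to_spans_py words (words_to_spans_py words)

-- ===== LEMMAS AND PROOFS =====

-- reference spans sequence, starting at offset o, over the raw word list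
def spansFrom (o : Int) : List String → List (Int × Int)
  | [] => []
  | w :: ws =>
    let n := PySem.Str.len (PySem.Str.strip w)
    if PySem.Str.strip w = "" then spansFrom o ws
    else (o, o + n) :: spansFrom (o + n) ws

-- the same over the already-stripped, non-empty list
def spansOf (o : Int) : List String → List (Int × Int)
  | [] => []
  | s :: ss => (o, o + PySem.Str.len s) :: spansOf (o + PySem.Str.len s) ss

-- boundary offsets after o
def offsList (o : Int) : List String → List Int
  | [] => []
  | s :: ss => (o + PySem.Str.len s) :: offsList (o + PySem.Str.len s) ss

theorem len_pos_of_ne (s : String) (h : s ≠ "") : 0 < PySem.Str.len s := by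
  have h1 : 0 < s.length := Nat.pos_of_ne_zero (fun hl => h (String.length_eq_zero_iff.mp hl))
  simp only [PySem.Str.len_eq]
  exact_mod_cast h1

theorem set_add_of_not_mem (s : List (Int × Int)) (x : Int × Int) (h : x ∉ s) :
    PySem.Set.add s x = s ++ [x] := by
  unfold PySem.Set.add PySem.Set.contains
  rw [if_neg (by simpa using h)]

-- A's loop, from any state whose spans all start strictly before the offset
theorem foldA_eq (ws : List String) :
    ∀ (s : List (Int × Int)) (o : Int), (∀ p ∈ s, p.1 < o) →
    (ws.foldl
      (fun (st : List (Int × Int) × Int) w =>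
        let w' := PySem.Str.strip w
        if w' = "" then st
        else (PySem.Set.add st.1 (st.2, st.2 + PySem.Str.len w'),
              st.2 + PySem.Str.len w'))
      (s, o)).1 = s ++ spansFrom o ws := by
  induction ws with
  | nil => intro s o _; simp [spansFrom]
  | cons w ws ih =>
    intro s o hs
    simp only [List.foldl_cons, spansFrom]
    by_cases hw : PySem.Str.strip w = ""
    · rw [if_pos hw, if_pos hw]
      exact ih s o hs
    · have hn : 0 < PySem.Str.len (PySem.Str.strip w) := len_pos_of_ne _ hw
      have hmem : (o, o + PySem.Str.len (PySem.Str.strip w)) ∉ s := by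
        intro hm
        have h2 : o + PySem.Str.len (PySem.Str.strip w) < o := by simpa using hs _ hm
        omega
      rw [if_neg hw, if_neg hw]
      simp only [set_add_of_not_mem s _ hmem]
      rw [ih (s ++ [(o, o + PySem.Str.len (PySem.Str.strip w))])
          (o + PySem.Str.len (PySem.Str.strip w))
          (by
            intro p hp
            rcases List.mem_append.mp hp with h | h
            · have := hs _ h; omega
            · simp only [List.mem_singleton] at h
              subst h
              exact lt_add_of_pos_right o hn)]
      simp

-- spansFrom over raw words = spansOf over the stripped non-empty list
theorem spansFrom_eq_spansOf (ws : List String) : ∀ o : Int,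
    spansFrom o ws = spansOf o ((ws.map PySem.Str.strip).filter (fun s => s ≠ "")) := by
  induction ws with
  | nil => intro o; simp [spansFrom, spansOf]
  | cons w ws ih =>
    intro o
    by_cases hw : PySem.Str.strip w = ""
    · simp [spansFrom, hw, ih]
    · simp [spansFrom, hw, spansOf, ih]

-- B's prefix-sum fold appends the boundary list
theorem foldB_eq (ss : List String) : ∀ (acc : List Int) (o : Int),
    acc.getLastD 0 = o →
    ss.foldl (fun acc s => acc ++ [acc.getLastD 0 + PySem.Str.len s]) acc
      = acc ++ offsList o ss := by
  induction ss with
  | nil => intro acc o _; simp [offsList]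
  | cons s ss ih =>
    intro acc o hlast
    simp only [List.foldl_cons, hlast]
    rw [ih (acc ++ [o + PySem.Str.len s]) (o + PySem.Str.len s) (List.getLastD_concat ..)]
    simp [offsList]

-- zipping consecutive boundaries yields the spans
theorem zip_offs (ss : List String) : ∀ o : Int,
    (o :: offsList o ss).zip (offsList o ss) = spansOf o ss := by
  induction ss with
  | nil => intro o; simp [offsList, spansOf]
  | cons s ss ih => intro o; simp [offsList, spansOf, ih]

-- the spans list has strictly increasing starts, so set() keeps it unchanged
theorem ofList_spansOf (ss : List String) (hpos : ∀ s ∈ ss, 0 < PySem.Str.len s) :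
    PySem.Set.ofList (spansOf 0 ss) = spansOf 0 ss := by
  have key : ∀ (ss : List String), (∀ s ∈ ss, 0 < PySem.Str.len s) →
      ∀ (acc : List (Int × Int)) (o : Int), (∀ p ∈ acc, p.1 < o) →
      (spansOf o ss).foldl PySem.Set.add acc = acc ++ spansOf o ss := by
    intro ss
    induction ss with
    | nil => intro _ acc o _; simp [spansOf]
    | cons s ss ih =>
      intro hpos acc o hacc
      have hn : 0 < PySem.Str.len s := hpos s (by simp)
      have hmem : (o, o + PySem.Str.len s) ∉ acc := by
        intro hm
        have h2 : o + PySem.Str.len s < o := by simpa using hacc _ hm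
        omega
      simp only [spansOf, List.foldl_cons]
      rw [set_add_of_not_mem acc _ hmem,
        ih (fun s hs => hpos s (by simp [hs])) _ (o + PySem.Str.len s)
          (by
            intro p hp
            rcases List.mem_append.mp hp with h | h
            · have := hacc _ h; omega
            · simp only [List.mem_singleton] at h
              subst h
              exact lt_add_of_pos_right o hn)]
      simp
  rw [PySem.Set.ofList_eq_foldl]
  exact key ss hpos [] 0 (by simp)

-- ===== VERDICT (by name: the statement is the Claim_ definition above) =====
theorem words_to_spans_py_spec : Claim_equal_words_to_spans_py := by
  intro words _
  unfold Spec_words_to_spans_py words_to_spans_py words_to_spans_py_alt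
  have hA := foldA_eq words PySem.Set.empty 0 (by simp [PySem.Set.empty])
  rw [hA]
  have hB := foldB_eq ((words.map PySem.Str.strip).filter (fun s => s ≠ "")) [(0 : Int)] 0
      (by simp)
  simp only [hB]
  have hzip : (((0 : Int) :: offsList 0 ((words.map PySem.Str.strip).filter (fun s => s ≠ ""))).zip
      (((0 : Int) :: offsList 0 ((words.map PySem.Str.strip).filter (fun s => s ≠ ""))).tail))
      = spansOf 0 ((words.map PySem.Str.strip).filter (fun s => s ≠ "")) := by
    simpa using zip_offs ((words.map PySem.Str.strip).filter (fun s => s ≠ "")) 0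
  have hpos : ∀ s ∈ (words.map PySem.Str.strip).filter (fun s => s ≠ ""), 0 < PySem.Str.len s := by
    intro s hs
    exact len_pos_of_ne s (by simpa using List.of_mem_filter hs)
  simp only [List.singleton_append, List.tail_cons] at *
  rw [hzip, ofList_spansOf _ hpos, ← spansFrom_eq_spansOf]
  simp [PySem.Set.empty]
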